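-- pv_equiv track=rewrite | github.com/9oelM/rdsa | problems/programmers.co.kr/best-set.py | solution
-- ===== SOURCE A (Python) =====
-- from math import ceil
--
-- def solution(n: int, s: int) -> int:
--     if n > s:
--         return [-1]
--     first = ceil(s / n)
--     ans = [first for _ in range(n)]
--     idx, total = 0, sum(ans)
--     while total != s:
--         total -= 1
--         ans[idx] -= 1
--         if idx + 1 == n: # last
--             idx = 0
--         else:
--             idx += 1
--     return ans
-- ===== SOURCE B (Python) =====
-- from math import ceil
--
-- def solution(n: int, s: int) -> int:
--     if n > s:
--         return [-1]
--     first = ceil(s / n)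
--     d = n * first - s  # number of decrements A's loop performs; 0 <= d < n
--     return [first - 1] * d + [first] * (n - d)
-- ===== Notes on version B (the rewrite author's own statement) =====
-- stated objective: simpler
-- what changed: Replaces the round-robin decrement while-loop with a closed-form construction: first = ceil(s/n), d = n*first - s, result = [first-1]*d + [first]*(n-d).
import Mathlib
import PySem

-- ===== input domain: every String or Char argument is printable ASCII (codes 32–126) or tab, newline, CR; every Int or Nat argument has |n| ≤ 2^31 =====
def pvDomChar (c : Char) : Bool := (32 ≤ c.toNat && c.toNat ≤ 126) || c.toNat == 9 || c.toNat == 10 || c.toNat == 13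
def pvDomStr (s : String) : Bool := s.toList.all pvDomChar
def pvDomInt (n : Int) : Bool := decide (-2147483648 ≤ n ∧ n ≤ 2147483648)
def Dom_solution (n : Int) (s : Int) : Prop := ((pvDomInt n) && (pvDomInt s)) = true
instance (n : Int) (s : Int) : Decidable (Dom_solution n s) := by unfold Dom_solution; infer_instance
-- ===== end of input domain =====

-- B replaces A's round-robin decrement loop with the closed-form list
-- [first-1]*d ++ [first]*(n-d) where d = n*ceil(s/n) - s (objective: simpler).


-- ===== PORT A =====
-- the while-loop of A, with fuel = initial total - s = the exact number of
-- iterations the Python loop performs on every input Pre_ admits (a guard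
-- making the recursion total, not a change of algorithm)
def solutionLoop (s n : Int) : Nat → List Int → Int → Int → List Int
  | 0, ans, _, _ => ans
  | fuel + 1, ans, idx, total =>
    if total = s then ans
    else
      let total' := total - 1
      let ans' := ans.modify idx.toNat (· - 1)   -- ans[idx] -= 1; idx is provably 0 ≤ idx < len ans under Pre_
      let idx' := if idx + 1 = n then 0 else idx + 1
      solutionLoop s n fuel ans' idx' total'

def solution (n : Int) (s : Int) : List Int :=
  if n > s then [-1]
  else
    -- ceil(s / n): Python's float ceil is exact on this domain (|s|,|n| ≤ 2^31 < 2^53);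
    -- ported by hand as the integer ceiling -((-s).fdiv n), exact for every n ≠ 0
    let first := -(Int.fdiv (-s) n)
    let ans := List.replicate n.toNat first        -- [first for _ in range(n)]
    let total := ans.sum                           -- sum(ans)
    solutionLoop s n (total - s).toNat ans 0 total

-- ===== PORT B =====
def solution_alt (n : Int) (s : Int) : List Int :=
  if n > s then [-1]
  else
    let first := -(Int.fdiv (-s) n)                -- ceil(s / n), exact as in port A
    let d := n * first - s
    List.replicate d.toNat (first - 1) ++ List.replicate (n - d).toNat first

-- ===== PRECONDITION & SPEC =====
-- Pre_ excludes exactly the inputs on which A raises: n = 0 with n ≤ s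
-- (ZeroDivisionError) and n < 0 with n ≤ s, s ≠ 0 (IndexError on the empty ans).
def Pre_solution (n : Int) (s : Int) : Prop := n > s ∨ 1 ≤ n ∨ (n < 0 ∧ s = 0)
instance (n : Int) (s : Int) : Decidable (Pre_solution n s) := by unfold Pre_solution; infer_instance
def pvWitness_solution : Int × Int := (3, 11)

def Spec_solution (n : Int) (s : Int) (out : List Int) : Prop := out = solution_alt n s
instance (n : Int) (s : Int) (out : List Int) : Decidable (Spec_solution n s out) := by unfold Spec_solution; infer_instance

-- ===== CLAIM (what is proved, stated in full; the proofs are below) =====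
def Claim_equal_solution : Prop := ∀ (n : Int) (s : Int), Dom_solution n s → Pre_solution n s → Spec_solution n s (solution n s)

-- ===== LEMMAS AND PROOFS =====

-- modifying position k of (replicate k a ++ b :: t)
theorem modify_replicate_append {α : Type} (a : α) (f : α → α) :
    ∀ (k : Nat) (b : α) (t : List α),
      (List.replicate k a ++ b :: t).modify k f = List.replicate k a ++ f b :: t := by
  intro k
  induction k with
  | zero => intro b t; simp [List.modify_zero_cons]
  | succ k ih => intro b t; simp [List.replicate_succ, List.modify_succ_cons, ih]

-- loop invariant: after k of the d decrements, ans = (f-1)^k ++ f^(N-k),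
-- idx = k, total = s + (d - k); m = d - k iterations remain
theorem solutionLoop_inv (s n f : Int) (N : Nat) (hnN : (N : Int) = n) :
    ∀ (m k : Nat), k + m ≤ N →
      solutionLoop s n m
          (List.replicate k (f - 1) ++ List.replicate (N - k) f)
          (k : Int) (s + m)
        = List.replicate (k + m) (f - 1) ++ List.replicate (N - (k + m)) f := by
  intro m
  induction m with
  | zero => intro k _; simp [solutionLoop]
  | succ m ih =>
    intro k hk
    have hkN : k < N := by omega
    have hne : ¬ (s + ((m : Int) + 1) = s) := by omega
    have hrep : List.replicate (N - k) f = f :: List.replicate (N - (k + 1)) f := by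
      have : N - k = (N - (k + 1)) + 1 := by omega
      rw [this, List.replicate_succ]
    have hmod :
        (List.replicate k (f - 1) ++ List.replicate (N - k) f).modify (Int.toNat k) (· - 1)
          = List.replicate (k + 1) (f - 1) ++ List.replicate (N - (k + 1)) f := by
      rw [hrep]
      have := modify_replicate_append (f - 1) (· - 1) k f (List.replicate (N - (k + 1)) f)
      simpa [List.replicate_succ'] using this
    show solutionLoop s n (m + 1) _ _ _ = _
    rw [solutionLoop]
    simp only [push_cast, Nat.cast_add, Nat.cast_one] at *
    rw [if_neg hne]
    by_cases hwrap : (k : Int) + 1 = n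
    · -- idx wraps to 0: then k + 1 = N, so m = 0 and the fuel is exhausted next step
      have hk1 : k + 1 = N := by omega
      have hm0 : m = 0 := by omega
      subst hm0
      simp only [hwrap, hmod]
      simp [solutionLoop]
    · rw [if_neg hwrap, hmod]
      have h2 : s + ((m : Int) + 1) - 1 = s + (m : Int) := by ring
      have := ih (k + 1) (by omega)
      push_cast at this
      simpa [h2, add_assoc, add_comm, add_left_comm] using this

-- characterisation of the ceiling division used by both ports (0 < n)
theorem ceil_bounds (n s : Int) (hn : 0 < n) :
    (-(Int.fdiv (-s) n) - 1) * n < s ∧ s ≤ -(Int.fdiv (-s) n) * n := by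
  rw [Int.fdiv_eq_ediv_of_nonneg _ (le_of_lt hn)]
  have h1 := Int.mul_ediv_add_emod (-s) n
  have h2 := Int.emod_nonneg (-s) (ne_of_gt hn)
  have h3 := Int.emod_lt_of_pos (-s) hn
  constructor <;> nlinarith [h1, h2, h3]

theorem solution_eq (n s : Int) (hpre : Pre_solution n s) :
    solution n s = solution_alt n s := by
  unfold solution solution_alt
  by_cases hgt : n > s
  · simp [hgt]
  · rw [if_neg hgt, if_neg hgt]
    set f := -(Int.fdiv (-s) n) with hf
    show solutionLoop s n ((List.replicate n.toNat f).sum - s).toNat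
        (List.replicate n.toNat f) 0 ((List.replicate n.toNat f).sum)
      = List.replicate (n * f - s).toNat (f - 1) ++ List.replicate (n - (n * f - s)).toNat f
    rcases hpre with h | h | h
    · exact absurd h hgt
    · -- main case: 1 ≤ n ≤ s
      have hns : n ≤ s := not_lt.mp hgt
      have hn0 : 0 < n := h
      obtain ⟨hlo, hhi⟩ := ceil_bounds n s hn0
      set N : Nat := n.toNat with hN
      have hnN : (N : Int) = n := Int.toNat_of_nonneg (by omega)
      have hsum : (List.replicate N f).sum = n * f := by
        rw [List.sum_replicate]
        rw [← hnN]; push_cast [nsmul_eq_mul]; ring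
      set d : Int := n * f - s with hd
      have hd0 : 0 ≤ d := by rw [hd]; nlinarith
      have hdN : d < n := by rw [hd]; nlinarith
      have hdt : (d.toNat : Int) = d := Int.toNat_of_nonneg hd0
      have hstep : (List.replicate N f).sum - s = d := by rw [hsum, hd]
      have htot : (List.replicate N f).sum = s + (d.toNat : Int) := by
        rw [hsum, hdt]; omega
      rw [hstep, htot]
      have hinv := solutionLoop_inv s n f N hnN d.toNat 0 (by omega)
      simp only [List.replicate, Nat.cast_zero, List.nil_append, Nat.sub_zero,
        Nat.zero_add] at hinv
      rw [hinv]
      have e2 : N - d.toNat = (n - d).toNat := by omega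
      rw [e2]
    · -- n < 0, s = 0: both return []
      obtain ⟨hn, hs⟩ := h
      subst hs
      have hf0 : f = 0 := by rw [hf]; simp [Int.zero_fdiv]
      have hN : n.toNat = 0 := by omega
      simp [hf0, hN, solutionLoop]

-- ===== VERDICT (by name: the statement is the Claim_ definition above) =====
theorem solution_spec : Claim_equal_solution := by
  intro n s _ hpre
  exact solution_eq n s hpre
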